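-- pv_equiv track=rewrite | github.com/SanchithHegde/boyer-moore-visualization-python | bm.py | small_l_prime_array
-- ===== SOURCE A (Python) =====
-- from typing import List, Tuple
--
-- def small_l_prime_array(n_arr: List[int]) -> List[int]:
--     """ Compile l' array using N array.
--
--     `l'[i]`  = largest `j <= m - i` such that `N[j] = j`. """
--
--     small_l_prime_arr = [0] * len(n_arr)
--
--     for i, _ in enumerate(n_arr):
--         if n_arr[i] == i + 1:  # Prefix matching a suffix
--             small_l_prime_arr[len(n_arr) - i - 1] = i + 1
--
--     for i in range(len(n_arr) - 2, -1, -1):  # "Smear" them out to the left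
--         if small_l_prime_arr[i] == 0:
--             small_l_prime_arr[i] = small_l_prime_arr[i + 1]
--
--     return small_l_prime_arr
-- ===== SOURCE B (Python) =====
-- from typing import List
--
-- def small_l_prime_array(n_arr: List[int]) -> List[int]:
--     """Single backward-logical pass: walk N left-to-right keeping the latest
--     prefix-suffix match as a carry, emit the carries, and reverse."""
--     carry = 0
--     out = []
--     for i, v in enumerate(n_arr):
--         if v == i + 1:
--             carry = i + 1
--         out.append(carry)
--     return out[::-1]
-- ===== Notes on version B (the rewrite author's own statement) =====
-- stated objective: simpler
-- what changed: Replaced A's two array passes (scatter placements into a preallocated array, then a second backward smear loop) by one forward scan that maintains a running carry of the latest prefix-suffix match and reverses the emitted list; no index arithmetic or in-place updates remain.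
import Mathlib
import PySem

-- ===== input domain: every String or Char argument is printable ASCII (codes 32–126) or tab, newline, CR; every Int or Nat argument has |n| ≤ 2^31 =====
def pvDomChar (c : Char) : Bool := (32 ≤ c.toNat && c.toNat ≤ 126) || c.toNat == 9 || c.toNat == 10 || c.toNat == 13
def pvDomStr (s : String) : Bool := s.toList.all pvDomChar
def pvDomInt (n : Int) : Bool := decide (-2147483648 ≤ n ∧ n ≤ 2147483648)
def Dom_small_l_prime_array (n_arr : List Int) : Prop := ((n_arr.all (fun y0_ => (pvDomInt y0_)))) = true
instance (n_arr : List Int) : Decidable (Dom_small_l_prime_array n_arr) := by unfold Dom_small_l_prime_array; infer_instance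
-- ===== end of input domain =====

-- B fuses A's two passes into one forward scan with a running carry (objective: simpler, same O(n) cost).

-- ===== PORT A =====
-- literal transliteration of A: pass 1 scatters i+1 into a zero array, pass 2 smears right-to-left
def small_l_prime_array (n_arr : List Int) : List Int :=
  let n := n_arr.length
  let a1 := (List.range n).foldl
    (fun arr i => if n_arr.getD i 0 = (i : Int) + 1 then arr.set (n - i - 1) ((i : Int) + 1) else arr)
    (List.replicate n (0 : Int))
  (PySem.List.pyRange ((n : Int) - 2) (-1) (-1)).foldl
    (fun arr i => if arr.getD i.toNat 0 = 0 then arr.set i.toNat (arr.getD (i.toNat + 1) 0) else arr)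
    a1

-- ===== PORT B =====
-- literal transliteration of Source B: one enumerate fold keeping (carry, out), then reverse (out[::-1])
def small_l_prime_array_alt (n_arr : List Int) : List Int :=
  (((PySem.List.enumerate n_arr 0).foldl
    (fun (st : Int × List Int) iv =>
      let carry := if iv.2 = iv.1 + 1 then iv.1 + 1 else st.1
      (carry, st.2 ++ [carry]))
    ((0 : Int), ([] : List Int))).2).reverse

-- ===== PRECONDITION & SPEC =====
def Spec_small_l_prime_array (n_arr : List Int) (out : List Int) : Prop := out = small_l_prime_array_alt n_arr
instance (n_arr : List Int) (out : List Int) : Decidable (Spec_small_l_prime_array n_arr out) := by unfold Spec_small_l_prime_array; infer_instance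

-- ===== CLAIM (what is proved, stated in full; the proofs are below) =====
def Claim_equal_small_l_prime_array : Prop := ∀ (n_arr : List Int), Dom_small_l_prime_array n_arr → Spec_small_l_prime_array n_arr (small_l_prime_array n_arr)

-- ===== LEMMAS AND PROOFS =====

-- the sequence of carry values B emits (i = current enumerate index, c = carry)
def pvCarries : List Int → Int → Int → List Int
  | [], _, _ => []
  | v :: t, i, c =>
      let c' := if v = i + 1 then i + 1 else c
      c' :: pvCarries t (i + 1) c'

theorem pvCarries_length (xs : List Int) : ∀ (i c : Int), (pvCarries xs i c).length = xs.length := by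
  induction xs with
  | nil => intro i c; rfl
  | cons v t ih => intro i c; simp [pvCarries, ih]

-- B's fold accumulates exactly pvCarries
theorem B_fold (xs : List Int) : ∀ (i c : Int) (acc : List Int),
    ((PySem.List.enumerate xs i).foldl
      (fun (st : Int × List Int) iv =>
        let carry := if iv.2 = iv.1 + 1 then iv.1 + 1 else st.1
        (carry, st.2 ++ [carry])) (c, acc)).2 = acc ++ pvCarries xs i c := by
  induction xs with
  | nil => intro i c acc; simp [PySem.List.enumerate_nil, pvCarries]
  | cons v t ih =>
      intro i c acc
      rw [PySem.List.enumerate_cons]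
      simp only [List.foldl_cons, pvCarries]
      rw [ih]
      simp

theorem B_eq (n_arr : List Int) :
    small_l_prime_array_alt n_arr = (pvCarries n_arr 0 0).reverse := by
  unfold small_l_prime_array_alt
  rw [B_fold]
  simp

-- recurrence for entries of pvCarries
theorem pvCarries_getD (xs : List Int) : ∀ (i c : Int) (k : Nat), k < xs.length →
    (pvCarries xs i c).getD k 0 =
      if xs.getD k 0 = i + (k : Int) + 1 then i + (k : Int) + 1
      else if k = 0 then c else (pvCarries xs i c).getD (k - 1) 0 := by
  induction xs with
  | nil => intro i c k hk; simp at hk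
  | cons v t ih =>
      intro i c k hk
      cases k with
      | zero =>
          simp [pvCarries]
      | succ k =>
          have hk' : k < t.length := by simpa using hk
          simp only [pvCarries, List.getD_cons_succ]
          rw [ih (i + 1) _ k hk']
          have hcast : i + ((k + 1 : Nat) : Int) + 1 = i + 1 + (k : Int) + 1 := by push_cast; ring
          rw [hcast]
          by_cases h : t.getD k 0 = i + 1 + (k : Int) + 1
          · rw [if_pos h, if_pos h]
          · rw [if_neg h, if_neg h]
            simp only [Nat.succ_ne_zero, if_false, Nat.add_sub_cancel]
            cases k with
            | zero => simp
            | succ k => simp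

-- specialization of the recurrence at i = 0, c = 0 (the value B puts at logical index k)
def pvC (n_arr : List Int) (k : Nat) : Int := (pvCarries n_arr 0 0).getD k 0

theorem pvC_rec (n_arr : List Int) (k : Nat) (hk : k < n_arr.length) :
    pvC n_arr k =
      if n_arr.getD k 0 = (k : Int) + 1 then (k : Int) + 1
      else if k = 0 then 0 else pvC n_arr (k - 1) := by
  unfold pvC
  rw [pvCarries_getD n_arr 0 0 k hk]
  simp

-- getD over set
theorem getD_set_self (l : List Int) (i : Nat) (a : Int) (h : i < l.length) :
    (l.set i a).getD i 0 = a := by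
  simp [List.getD, h]

theorem getD_set_ne (l : List Int) (i j : Nat) (a : Int) (h : i ≠ j) :
    (l.set i a).getD j 0 = l.getD j 0 := by
  simp [List.getD, List.getElem?_set_ne h]

-- value pass 1 leaves at position p (full pass)
def pvA1 (n_arr : List Int) (p : Nat) : Int :=
  if n_arr.getD (n_arr.length - 1 - p) 0 = ((n_arr.length - 1 - p : Nat) : Int) + 1
  then ((n_arr.length - 1 - p : Nat) : Int) + 1 else 0

-- pass-1 characterization, by induction on the number of processed indices
theorem pass1 (n_arr : List Int) : ∀ (m : Nat), m ≤ n_arr.length →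
    ((List.range m).foldl
      (fun arr i => if n_arr.getD i 0 = (i : Int) + 1
        then arr.set (n_arr.length - i - 1) ((i : Int) + 1) else arr)
      (List.replicate n_arr.length (0 : Int))).length = n_arr.length ∧
    ∀ p : Nat, p < n_arr.length →
      ((List.range m).foldl
        (fun arr i => if n_arr.getD i 0 = (i : Int) + 1
          then arr.set (n_arr.length - i - 1) ((i : Int) + 1) else arr)
        (List.replicate n_arr.length (0 : Int))).getD p 0 =
      if (n_arr.length - 1 - p < m ∧
          n_arr.getD (n_arr.length - 1 - p) 0 = ((n_arr.length - 1 - p : Nat) : Int) + 1)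
        then ((n_arr.length - 1 - p : Nat) : Int) + 1 else 0 := by
  intro m
  induction m with
  | zero =>
      intro _
      refine ⟨by simp, ?_⟩
      intro p hp
      simp
  | succ m ih =>
      intro hm
      obtain ⟨hlen, hval⟩ := ih (by omega)
      rw [List.range_succ, List.foldl_append]
      refine ⟨?_, ?_⟩
      · simp only [List.foldl_cons, List.foldl_nil]
        split
        · rw [List.length_set]; exact hlen
        · exact hlen
      · intro p hp
        simp only [List.foldl_cons, List.foldl_nil]
        by_cases hc : n_arr.getD m 0 = (m : Int) + 1
        · rw [if_pos hc]
          by_cases hpq : p = n_arr.length - m - 1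
          · subst hpq
            rw [getD_set_self _ _ _ (by omega)]
            have hidx : n_arr.length - 1 - (n_arr.length - m - 1) = m := by omega
            rw [hidx, if_pos ⟨by omega, hc⟩]
          · rw [getD_set_ne _ _ _ _ (fun h => hpq h.symm), hval p hp]
            have he : (n_arr.length - 1 - p < m + 1) ↔ (n_arr.length - 1 - p < m) := by omega
            simp only [he]
        · rw [if_neg hc, hval p hp]
          by_cases hpm : n_arr.length - 1 - p = m
          · rw [hpm]
            rw [if_neg (fun h => hc h.2), if_neg (fun h => hc h.2)]
          · have he : (n_arr.length - 1 - p < m + 1) ↔ (n_arr.length - 1 - p < m) := by omega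
            simp only [he]

-- length is preserved by the smear fold
theorem smear_length (r : List Int) : ∀ (arr : List Int),
    ((r.foldl (fun arr i => if arr.getD i.toNat 0 = 0
      then arr.set i.toNat (arr.getD (i.toNat + 1) 0) else arr) arr)).length = arr.length := by
  induction r with
  | nil => intro arr; rfl
  | cons x t ih =>
      intro arr
      simp only [List.foldl_cons]
      split
      · rw [ih]; simp
      · rw [ih]

-- one smear step at index k finalises position k and keeps all others
theorem step_one (n_arr : List Int) (k : Nat) (arr : List Int)
    (hlen : arr.length = n_arr.length) (hkn : k + 2 ≤ n_arr.length)
    (hk1 : arr.getD (k + 1) 0 = pvC n_arr (n_arr.length - 1 - (k + 1)))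
    (hA : arr.getD k 0 = pvA1 n_arr k) :
    (if arr.getD k 0 = 0 then arr.set k (arr.getD (k + 1) 0) else arr).length = arr.length ∧
    (if arr.getD k 0 = 0 then arr.set k (arr.getD (k + 1) 0) else arr).getD k 0
        = pvC n_arr (n_arr.length - 1 - k) ∧
    ∀ p : Nat, p ≠ k →
      (if arr.getD k 0 = 0 then arr.set k (arr.getD (k + 1) 0) else arr).getD p 0 = arr.getD p 0 := by
  have hjn : n_arr.length - 1 - k < n_arr.length := by omega
  have hrec := pvC_rec n_arr (n_arr.length - 1 - k) hjn
  have hj0 : n_arr.length - 1 - k ≠ 0 := by omega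
  rw [if_neg hj0] at hrec
  have hidx : n_arr.length - 1 - k - 1 = n_arr.length - 1 - (k + 1) := by omega
  rw [hidx] at hrec
  by_cases hplaced : n_arr.getD (n_arr.length - 1 - k) 0 = ((n_arr.length - 1 - k : Nat) : Int) + 1
  · have hA' : arr.getD k 0 = ((n_arr.length - 1 - k : Nat) : Int) + 1 := by
      rw [hA, pvA1, if_pos hplaced]
    have hz : ¬ arr.getD k 0 = 0 := by rw [hA']; intro h; omega
    rw [if_neg hz]
    exact ⟨rfl, by rw [hA', hrec, if_pos hplaced], fun p _ => rfl⟩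
  · have hA0 : arr.getD k 0 = 0 := by rw [hA, pvA1, if_neg hplaced]
    rw [if_pos hA0]
    refine ⟨by simp, ?_, ?_⟩
    · rw [getD_set_self _ _ _ (by omega), hk1, hrec, if_neg hplaced]
    · intro p hpk
      exact getD_set_ne _ _ _ _ (fun h => hpk h.symm)

-- the smear pass turns pass-1 values into pvC, right to left
theorem smear (n_arr : List Int) : ∀ (k : Nat) (arr : List Int),
    arr.length = n_arr.length → k + 2 ≤ n_arr.length →
    (∀ p : Nat, k < p → p < n_arr.length → arr.getD p 0 = pvC n_arr (n_arr.length - 1 - p)) →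
    (∀ p : Nat, p ≤ k → arr.getD p 0 = pvA1 n_arr p) →
    ∀ p : Nat, p < n_arr.length →
      ((PySem.List.pyRange (k : Int) (-1) (-1)).foldl
        (fun arr i => if arr.getD i.toNat 0 = 0
          then arr.set i.toNat (arr.getD (i.toNat + 1) 0) else arr) arr).getD p 0
      = pvC n_arr (n_arr.length - 1 - p) := by
  intro k
  induction k with
  | zero =>
      intro arr hlen hkn h1 h2 p hp
      rw [PySem.List.pyRange_neg_one_cons (by norm_num), PySem.List.pyRange_neg_one_eq_nil (by norm_num)]
      simp only [List.foldl_cons, List.foldl_nil, Int.toNat_natCast]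
      obtain ⟨_, hk0, hother⟩ :=
        step_one n_arr 0 arr hlen hkn (h1 1 (by omega) (by omega)) (h2 0 (le_refl 0))
      by_cases hp0 : p = 0
      · subst hp0; exact hk0
      · rw [hother p hp0]; exact h1 p (by omega) hp
  | succ k ih =>
      intro arr hlen hkn h1 h2 p hp
      rw [PySem.List.pyRange_neg_one_cons (by push_cast; omega)]
      have hcast : ((k + 1 : Nat) : Int) - 1 = ((k : Nat) : Int) := by push_cast; ring
      rw [hcast]
      simp only [List.foldl_cons, Int.toNat_natCast]
      obtain ⟨hlen', hknew, hother⟩ :=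
        step_one n_arr (k + 1) arr hlen hkn (h1 (k + 2) (by omega) (by omega))
          (h2 (k + 1) (le_refl _))
      refine ih _ (by rw [hlen']; exact hlen) (by omega) ?_ ?_ p hp
      · intro q hq hqn
        by_cases hq1 : q = k + 1
        · subst hq1; exact hknew
        · rw [hother q hq1]; exact h1 q (by omega) hqn
      · intro q hqk
        rw [hother q (by omega)]; exact h2 q (by omega)

-- getD-wise extensionality
theorem eq_of_getD (l₁ l₂ : List Int) (h : l₁.length = l₂.length)
    (he : ∀ p : Nat, p < l₁.length → l₁.getD p 0 = l₂.getD p 0) : l₁ = l₂ := by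
  apply List.ext_getElem h
  intro i hi1 hi2
  have := he i hi1
  rwa [List.getD_eq_getElem _ _ hi1, List.getD_eq_getElem _ _ hi2] at this

theorem rev_getD (n_arr : List Int) (p : Nat) (hp : p < n_arr.length) :
    ((pvCarries n_arr 0 0).reverse).getD p 0 = pvC n_arr (n_arr.length - 1 - p) := by
  have hl : (pvCarries n_arr 0 0).length = n_arr.length := pvCarries_length n_arr 0 0
  have hp' : p < (pvCarries n_arr 0 0).reverse.length := by rw [List.length_reverse, hl]; exact hp
  rw [List.getD_eq_getElem _ _ hp', List.getElem_reverse]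
  have h2 : n_arr.length - 1 - p < (pvCarries n_arr 0 0).length := by rw [hl]; omega
  rw [pvC, List.getD_eq_getElem _ _ h2]
  have hidx : (pvCarries n_arr 0 0).length - 1 - p = n_arr.length - 1 - p := by rw [hl]
  simp only [hidx]

theorem A_eq (n_arr : List Int) :
    small_l_prime_array n_arr = (pvCarries n_arr 0 0).reverse := by
  obtain ⟨hlen1, hv1⟩ := pass1 n_arr n_arr.length (le_refl _)
  have hA1 : ∀ p : Nat, p < n_arr.length →
      ((List.range n_arr.length).foldl
        (fun arr i => if n_arr.getD i 0 = (i : Int) + 1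
          then arr.set (n_arr.length - i - 1) ((i : Int) + 1) else arr)
        (List.replicate n_arr.length (0 : Int))).getD p 0 = pvA1 n_arr p := by
    intro p hp
    rw [hv1 p hp, pvA1]
    have hlt : n_arr.length - 1 - p < n_arr.length := by omega
    simp only [hlt, true_and]
  have hrevlen : ((pvCarries n_arr 0 0).reverse).length = n_arr.length := by
    rw [List.length_reverse, pvCarries_length]
  simp only [small_l_prime_array]
  by_cases h2n : 2 ≤ n_arr.length
  · have hc : ((n_arr.length : Int) - 2) = ((n_arr.length - 2 : Nat) : Int) := by omega
    rw [hc]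
    have hsm := smear n_arr (n_arr.length - 2) _ hlen1 (by omega)
      (by
        intro q hq hqn
        have hq' : q = n_arr.length - 1 := by omega
        subst hq'
        rw [hA1 _ hqn, pvA1]
        have hi0 : n_arr.length - 1 - (n_arr.length - 1) = 0 := by omega
        rw [hi0, pvC_rec n_arr 0 (by omega)]
        simp)
      (by intro q hqk; exact hA1 q (by omega))
    apply eq_of_getD
    · rw [smear_length, hlen1, hrevlen]
    · intro p hp
      rw [smear_length, hlen1] at hp
      rw [hsm p hp, rev_getD n_arr p hp]
  · by_cases h1n : n_arr.length = 1
    · have hm1 : ((n_arr.length : Int) - 2) = -1 := by rw [h1n]; norm_num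
      rw [hm1, PySem.List.pyRange_neg_one_eq_nil (by norm_num)]
      simp only [List.foldl_nil]
      apply eq_of_getD
      · rw [hlen1, hrevlen, h1n]
      · intro p hp
        rw [hlen1, h1n] at hp
        have hp0 : p = 0 := by omega
        subst hp0
        rw [hA1 0 (by omega), rev_getD n_arr 0 (by omega), pvA1]
        have hi0 : n_arr.length - 1 - 0 = 0 := by omega
        rw [hi0, pvC_rec n_arr 0 (by omega)]
        simp
    · have hz : n_arr = [] := List.eq_nil_of_length_eq_zero (by omega)
      subst hz
      decide

-- ===== VERDICT (by name: the statement is the Claim_ definition above) =====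
theorem small_l_prime_array_spec : Claim_equal_small_l_prime_array := by
  intro n_arr _
  unfold Spec_small_l_prime_array
  rw [A_eq, B_eq]
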